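-- pv_equiv track=rewrite | github.com/olafvanhalm-ship-it/eagle | Application/canonical/dependency_graph.py | find_affected_by_collection_edit
-- ===== SOURCE A (Python) =====
-- AIFMD_COMPOSITE_RULES: dict[str, dict] = {
--     # AIFM composite: total AuM across all AIFs
--     "24": {
--         "depends_on": [("fund_dynamic", "nav")],
--         "aggregation": "sum_all_aifs",
--         "description": "Total AuM under management",
--     },
--     # AIF composite: NAV (field 50) from positions
--     "50": {
--         "depends_on": [("positions", "market_value")],
--         "aggregation": "sum",
--         "description": "AIF NAV",
--     },
--     # AIF composite: gross asset value (field 51)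
--     "51": {
--         "depends_on": [("positions", "market_value"), ("positions", "notional_value")],
--         "aggregation": "sum_absolute",
--         "description": "Gross asset value",
--     },
--     # Top 5 counterparties (fields 160-171) depend on counterparties collection
--     "160": {
--         "depends_on": [("counterparties", "exposure_value")],
--         "aggregation": "top_n",
--         "description": "Top 5 counterparties by exposure",
--     },
-- }
--
-- COLLECTION_ENTITY_GROUPS = {
--     "positions": "positions",
--     "transactions": "transactions",
--     "share_classes": "share_classes",
--     "counterparties": "counterparty_risks",
--     "strategies": "strategies",
--     "investors": "investor_groups",
--     "risk_measures": "risks",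
--     "borrowing_sources": "borrow_sources",
--     "controlled_companies": "dominant_influences",
--     "controlled_structures": "controlled_structures",
-- }
--
-- def find_affected_by_collection_edit(
--     entity_type: str,
-- ) -> list[dict[str, str]]:
--     """Find report fields affected by editing any field in a collection entity.
--
--     For collection entities (positions, transactions, etc.), editing any row
--     may affect the repeating group in the report plus any composite fields
--     that aggregate over that collection.
--
--     Args:
--         entity_type: Collection entity type (e.g. "positions", "counterparties")
--
--     Returns:
--         List of affected field descriptors.
--     """
--     affected = []
--
--     # Check composite rules for dependencies on this entity type
--     for field_id, rule in AIFMD_COMPOSITE_RULES.items():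
--         for dep_entity, dep_field in rule["depends_on"]:
--             if dep_entity == entity_type:
--                 affected.append({
--                     "report_type": "AIF",
--                     "field_id": field_id,
--                     "cascade_type": "composite",
--                 })
--                 break  # Don't duplicate for same field_id
--
--     # The repeating group itself
--     if entity_type in COLLECTION_ENTITY_GROUPS:
--         affected.append({
--             "report_type": "AIF",
--             "field_id": f"group:{COLLECTION_ENTITY_GROUPS[entity_type]}",
--             "cascade_type": "group_update",
--         })
--
--     return affected
-- ===== SOURCE B (Python) =====
-- AIFMD_COMPOSITE_RULES: dict[str, dict] = {
--     "24": {
--         "depends_on": [("fund_dynamic", "nav")],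
--         "aggregation": "sum_all_aifs",
--         "description": "Total AuM under management",
--     },
--     "50": {
--         "depends_on": [("positions", "market_value")],
--         "aggregation": "sum",
--         "description": "AIF NAV",
--     },
--     "51": {
--         "depends_on": [("positions", "market_value"), ("positions", "notional_value")],
--         "aggregation": "sum_absolute",
--         "description": "Gross asset value",
--     },
--     "160": {
--         "depends_on": [("counterparties", "exposure_value")],
--         "aggregation": "top_n",
--         "description": "Top 5 counterparties by exposure",
--     },
-- }
--
-- COLLECTION_ENTITY_GROUPS = {
--     "positions": "positions",
--     "transactions": "transactions",
--     "share_classes": "share_classes",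
--     "counterparties": "counterparty_risks",
--     "strategies": "strategies",
--     "investors": "investor_groups",
--     "risk_measures": "risks",
--     "borrowing_sources": "borrow_sources",
--     "controlled_companies": "dominant_influences",
--     "controlled_structures": "controlled_structures",
-- }
--
-- # Reverse index: dep_entity -> field_ids (rule order, deduped per field_id),
-- # built once at import time.
-- _REV: dict[str, list[str]] = {}
-- for _fid, _rule in AIFMD_COMPOSITE_RULES.items():
--     for _dep_entity, _dep_field in _rule["depends_on"]:
--         _lst = _REV.setdefault(_dep_entity, [])
--         if _fid not in _lst:
--             _lst.append(_fid)
--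
--
-- def find_affected_by_collection_edit(
--     entity_type: str,
-- ) -> list[dict[str, str]]:
--     affected = [
--         {"report_type": "AIF", "field_id": fid, "cascade_type": "composite"}
--         for fid in _REV.get(entity_type, [])
--     ]
--     group = COLLECTION_ENTITY_GROUPS.get(entity_type)
--     if group is not None:
--         affected.append({
--             "report_type": "AIF",
--             "field_id": f"group:{group}",
--             "cascade_type": "group_update",
--         })
--     return affected
-- ===== Notes on version B (the rewrite author's own statement) =====
-- stated objective: simpler
-- what changed: Replaced A's per-call nested scan over the rules with a break-on-first-match by a module-level reverse index (dep_entity -> deduped field_ids) built once, so the function is a single lookup plus a flat map.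
import Mathlib
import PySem

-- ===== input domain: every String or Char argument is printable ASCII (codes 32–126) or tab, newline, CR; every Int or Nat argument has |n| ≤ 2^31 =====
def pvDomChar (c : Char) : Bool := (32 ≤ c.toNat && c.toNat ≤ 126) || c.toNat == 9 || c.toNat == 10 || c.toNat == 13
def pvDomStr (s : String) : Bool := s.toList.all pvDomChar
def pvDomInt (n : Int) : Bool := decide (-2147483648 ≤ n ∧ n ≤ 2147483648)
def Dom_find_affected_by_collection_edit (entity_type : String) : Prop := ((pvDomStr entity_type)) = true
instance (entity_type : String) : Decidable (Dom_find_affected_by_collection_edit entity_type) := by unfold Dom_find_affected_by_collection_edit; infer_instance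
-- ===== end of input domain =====

-- B replaces A's nested scan-with-break over the rules by a reverse index
-- (dep_entity -> deduped field_ids) built once, then a flat lookup-and-map (simpler).

-- ===== PORT A =====
-- AIFMD_COMPOSITE_RULES, modelled as (field_id, depends_on) in insertion order
-- (the function only reads "depends_on"; the other, heterogeneous rule entries are unused).
def pvRules : List (String × List (String × String)) :=
  [("24",  [("fund_dynamic", "nav")]),
   ("50",  [("positions", "market_value")]),
   ("51",  [("positions", "market_value"), ("positions", "notional_value")]),
   ("160", [("counterparties", "exposure_value")])]

-- COLLECTION_ENTITY_GROUPS (shared module constant)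
def pvGroups : PySem.Dict String String :=
  PySem.Dict.ofList
    [("positions", "positions"), ("transactions", "transactions"),
     ("share_classes", "share_classes"), ("counterparties", "counterparty_risks"),
     ("strategies", "strategies"), ("investors", "investor_groups"),
     ("risk_measures", "risks"), ("borrowing_sources", "borrow_sources"),
     ("controlled_companies", "dominant_influences"),
     ("controlled_structures", "controlled_structures")]

-- inner 'for dep in depends_on: … break' loop of A
def pvScanDeps (entity_type field_id : String) (deps : List (String × String))
    (affected : List (List (String × String))) : List (List (String × String)) :=
  match deps with
  | [] => affected
  | (dep_entity, _dep_field) :: rest =>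
    if dep_entity == entity_type then
      affected ++ [[("report_type", "AIF"), ("field_id", field_id), ("cascade_type", "composite")]]
    else pvScanDeps entity_type field_id rest affected

def find_affected_by_collection_edit (entity_type : String) : List (List (String × String)) :=
  let affected := pvRules.foldl (fun acc r => pvScanDeps entity_type r.1 r.2 acc) []
  match pvGroups.get? entity_type with
  | some g =>
      affected ++ [[("report_type", "AIF"), ("field_id", "group:" ++ g), ("cascade_type", "group_update")]]
  | none => affected

-- ===== PORT B =====
-- reverse index: dep_entity -> field_ids (rule order, deduped per field_id), built once
def pvREV : PySem.Dict String (List String) :=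
  pvRules.foldl
    (fun rev r =>
      r.2.foldl
        (fun rev dep =>
          let lst := rev.getD dep.1 []
          if lst.contains r.1 then rev else rev.insert dep.1 (lst ++ [r.1]))
        rev)
    PySem.Dict.empty

def find_affected_by_collection_edit_alt (entity_type : String) : List (List (String × String)) :=
  let affected := (pvREV.getD entity_type []).map
    (fun fid => [("report_type", "AIF"), ("field_id", fid), ("cascade_type", "composite")])
  match pvGroups.get? entity_type with
  | some g =>
      affected ++ [[("report_type", "AIF"), ("field_id", "group:" ++ g), ("cascade_type", "group_update")]]
  | none => affected

-- ===== PRECONDITION & SPEC =====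
def Spec_find_affected_by_collection_edit (entity_type : String) (out : List (List (String × String))) : Prop := out = find_affected_by_collection_edit_alt entity_type
instance (entity_type : String) (out : List (List (String × String))) : Decidable (Spec_find_affected_by_collection_edit entity_type out) := by unfold Spec_find_affected_by_collection_edit; infer_instance

-- ===== CLAIM (what is proved, stated in full; the proofs are below) =====
def Claim_equal_find_affected_by_collection_edit : Prop := ∀ (entity_type : String), Dom_find_affected_by_collection_edit entity_type → Spec_find_affected_by_collection_edit entity_type (find_affected_by_collection_edit entity_type)

-- ===== LEMMAS AND PROOFS =====
theorem pvREV_eq : pvREV = PySem.Dict.mk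
    [("fund_dynamic", ["24"]), ("positions", ["50", "51"]), ("counterparties", ["160"])] := by
  decide

theorem pvGroups_eq : pvGroups = PySem.Dict.mk
    [("positions", "positions"), ("transactions", "transactions"),
     ("share_classes", "share_classes"), ("counterparties", "counterparty_risks"),
     ("strategies", "strategies"), ("investors", "investor_groups"),
     ("risk_measures", "risks"), ("borrowing_sources", "borrow_sources"),
     ("controlled_companies", "dominant_influences"),
     ("controlled_structures", "controlled_structures")] := by
  decide

-- ===== VERDICT (by name: the statement is the Claim_ definition above) =====
theorem find_affected_by_collection_edit_spec : Claim_equal_find_affected_by_collection_edit := by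
  intro s _
  unfold Spec_find_affected_by_collection_edit
  by_cases h1 : s = "fund_dynamic"; · subst h1; decide
  by_cases h2 : s = "positions"; · subst h2; decide
  by_cases h3 : s = "counterparties"; · subst h3; decide
  by_cases h4 : s = "transactions"; · subst h4; decide
  by_cases h5 : s = "share_classes"; · subst h5; decide
  by_cases h6 : s = "strategies"; · subst h6; decide
  by_cases h7 : s = "investors"; · subst h7; decide
  by_cases h8 : s = "risk_measures"; · subst h8; decide
  by_cases h9 : s = "borrowing_sources"; · subst h9; decide
  by_cases h10 : s = "controlled_companies"; · subst h10; decide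
  by_cases h11 : s = "controlled_structures"; · subst h11; decide
  simp [find_affected_by_collection_edit, find_affected_by_collection_edit_alt,
    pvRules, pvGroups_eq, pvREV_eq, pvScanDeps, PySem.Dict.getD, PySem.Dict.get?,
    Ne.symm h1, Ne.symm h2, Ne.symm h3, Ne.symm h4, Ne.symm h5, Ne.symm h6,
    Ne.symm h7, Ne.symm h8, Ne.symm h9, Ne.symm h10, Ne.symm h11]
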